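-- pv_equiv track=rewrite | github.com/Ania264/PodstawyProgramowania | funkcje_zadania.py | liczby_niezalezne
-- ===== SOURCE A (Python) =====
-- def liczby_niezalezne(lista):
--     wynik = []
--     for e in lista:
--         dzielniki = []
--         for l in lista:
--             if e % l == 0:
--                 dzielniki.append(1)
--         if len(dzielniki) == 1:
--             wynik.append(e)
--     return wynik
-- ===== SOURCE B (Python) =====
-- def liczby_niezalezne(lista):
--     # One counter of the values, then per element enumerate the divisors of |e|
--     # up to sqrt(|e|) and sum the counts of +-d and +-(|e|//d).
--     cnt = {}
--     for x in lista:
--         cnt[x] = cnt.get(x, 0) + 1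
--     wynik = []
--     for e in lista:
--         a = e if e >= 0 else -e
--         if a == 0:
--             c = len(lista)
--         else:
--             c = 0
--             d = 1
--             while d * d <= a:
--                 if a % d == 0:
--                     c += cnt.get(d, 0) + cnt.get(-d, 0)
--                     q = a // d
--                     if q != d:
--                         c += cnt.get(q, 0) + cnt.get(-q, 0)
--                 d += 1
--         if c == 1:
--             wynik.append(e)
--     return wynik
-- ===== Notes on version B (the rewrite author's own statement) =====
-- stated objective: faster
-- what changed: Instead of testing every list element against every other (A's nested loops), B builds a counter of the values once and, for each element e, enumerates the divisors d of |e| up to sqrt(|e|), summing the stored counts of +-d and +-(|e|//d).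
import Mathlib
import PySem

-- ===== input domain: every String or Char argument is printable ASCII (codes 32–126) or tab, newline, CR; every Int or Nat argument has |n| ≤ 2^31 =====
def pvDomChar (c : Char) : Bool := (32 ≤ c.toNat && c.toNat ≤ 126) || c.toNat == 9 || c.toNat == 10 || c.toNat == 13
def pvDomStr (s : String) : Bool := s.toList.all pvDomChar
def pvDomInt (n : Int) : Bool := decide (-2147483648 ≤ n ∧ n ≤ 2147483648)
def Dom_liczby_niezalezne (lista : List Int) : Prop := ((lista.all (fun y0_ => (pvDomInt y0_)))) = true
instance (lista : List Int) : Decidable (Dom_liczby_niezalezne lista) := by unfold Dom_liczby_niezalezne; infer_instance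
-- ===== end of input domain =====

-- B replaces A's quadratic rescan of the list for every element by one counter of the values plus a
-- per-element enumeration of the divisors of |e| up to sqrt(|e|) (objective: faster).

-- ===== PORT A =====
def liczby_niezalezne (lista : List Int) : List Int :=
  lista.foldl (fun wynik e =>
    let dzielniki : List Int :=
      lista.foldl (fun dzielniki l =>
        if PySem.Int.mod e l == 0 then dzielniki ++ [1] else dzielniki) []
    if dzielniki.length == 1 then wynik ++ [e] else wynik) []

-- ===== PORT B =====
-- the 'while d * d <= a' loop of Source B (c, d are the loop state; exact transliteration)
def pvSqrtLoop (cnt : PySem.Dict Int Int) (a : Int) (c : Int) (d : Nat) : Int :=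
  if h : (d : Int) * d ≤ a then
    pvSqrtLoop cnt a
      (if PySem.Int.mod a d == 0 then
        let c1 := c + (cnt.getD (d : Int) 0 + cnt.getD (-(d : Int)) 0)
        let q := PySem.Int.floordiv a (d : Int)
        if q != (d : Int) then c1 + (cnt.getD q 0 + cnt.getD (-q) 0) else c1
      else c)
      (d + 1)
  else c
termination_by (a + 1 - (d : Int) * d).toNat
decreasing_by
  have h2 : ((d : Int) + 1) * ((d : Int) + 1) > (d : Int) * d := by nlinarith [Int.natCast_nonneg d]
  push_cast
  generalize (d : Int) * d = x at *
  generalize ((d : Int) + 1) * ((d : Int) + 1) = y at *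
  omega

def liczby_niezalezne_alt (lista : List Int) : List Int :=
  let cnt := lista.foldl (fun d x => d.insert x (d.getD x 0 + 1))
    (PySem.Dict.empty : PySem.Dict Int Int)
  lista.foldl (fun wynik e =>
    let a := if e ≥ 0 then e else -e
    let c := if a == 0 then (lista.length : Int) else pvSqrtLoop cnt a 0 1
    if c == 1 then wynik ++ [e] else wynik) []

-- ===== PRECONDITION & SPEC =====
-- Pre_ excludes lists containing 0: there Python's 'e % 0' raises ZeroDivisionError (in A and in B).
def Pre_liczby_niezalezne (lista : List Int) : Prop := (0 : Int) ∉ lista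
instance (lista : List Int) : Decidable (Pre_liczby_niezalezne lista) := by unfold Pre_liczby_niezalezne; infer_instance
def pvWitness_liczby_niezalezne : List Int := [2, 3, 4, 9, 5]

def Spec_liczby_niezalezne (lista : List Int) (out : List Int) : Prop := out = liczby_niezalezne_alt lista
instance (lista : List Int) (out : List Int) : Decidable (Spec_liczby_niezalezne lista out) := by unfold Spec_liczby_niezalezne; infer_instance

-- ===== CLAIM (what is proved, stated in full; the proofs are below) =====
def Claim_equal_liczby_niezalezne : Prop := ∀ (lista : List Int), Dom_liczby_niezalezne lista → Pre_liczby_niezalezne lista → Spec_liczby_niezalezne lista (liczby_niezalezne lista)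

-- ===== LEMMAS AND PROOFS =====

-- A is the filter of the list by "exactly one element of the list divides e".
theorem liczby_niezalezne_eq_filter (lista : List Int) :
    liczby_niezalezne lista =
      lista.filter (fun e => lista.countP (fun l => PySem.Int.mod e l == 0) == 1) := by
  unfold liczby_niezalezne
  simp only [PySem.List.foldl_append_if (f := fun _ => (1 : Int)), List.nil_append,
    List.length_map, ← List.countP_eq_length_filter, PySem.List.foldl_append_if_eq_filter]

-- the while-loop sums the counts over the divisor pairs (d, a/d) with d in [start, sqrt a]
theorem pvSqrtLoop_inv (cnt : PySem.Dict Int Int) (A : Nat) :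
    ∀ n d c, 1 ≤ d → Nat.sqrt A + 1 - d = n →
    pvSqrtLoop cnt (A : Int) c d =
      c + ∑ k ∈ (Finset.Ico d (Nat.sqrt A + 1)).filter (fun k => k ∣ A),
        ((cnt.getD (k : Int) 0 + cnt.getD (-(k : Int)) 0)
          + if A / k ≠ k then cnt.getD ((A / k : Nat) : Int) 0 + cnt.getD (-((A / k : Nat) : Int)) 0 else 0) := by
  intro n
  induction n with
  | zero =>
    intro d c hd hn
    have hds : Nat.sqrt A < d := by omega
    have hcond : ¬ ((d : Int) * d ≤ (A : Int)) := by
      have : A < d * d := by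
        have h2 := (Nat.sqrt_lt').mp hds
        nlinarith [h2]
      exact_mod_cast not_le.mpr (by exact_mod_cast this)
    rw [pvSqrtLoop, dif_neg hcond]
    rw [show Finset.Ico d (Nat.sqrt A + 1) = ∅ by apply Finset.Ico_eq_empty; omega]
    simp
  | succ n ih =>
    intro d c hd hn
    have hds : d ≤ Nat.sqrt A := by omega
    have hcond : (d : Int) * d ≤ (A : Int) := by
      have := Nat.le_sqrt.mp hds
      exact_mod_cast this
    rw [pvSqrtLoop, dif_pos hcond]
    rw [ih (d + 1) _ (by omega) (by omega)]
    rw [Finset.sum_filter, Finset.sum_filter,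
      Finset.sum_eq_sum_Ico_succ_bot (by omega : d < Nat.sqrt A + 1)]
    have hmod : (PySem.Int.mod (A : Int) (d : Int) == 0) = decide (d ∣ A) := by
      by_cases hdd : d ∣ A
      · simp [hdd, (PySem.Int.mod_eq_zero_iff_dvd (A : Int) (d : Int)).mpr
          (Int.natCast_dvd_natCast.mpr hdd)]
      · simp only [hdd, decide_false]
        rw [beq_eq_false_iff_ne]
        intro hc
        exact hdd (Int.natCast_dvd_natCast.mp ((PySem.Int.mod_eq_zero_iff_dvd _ _).mp hc))
    have hq : PySem.Int.floordiv (A : Int) (d : Int) = ((A / d : Nat) : Int) :=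
      PySem.Int.floordiv_natCast A d
    rw [hmod, hq]
    by_cases hdvd : d ∣ A
    · by_cases hne : A / d = d
      · simp only [hdvd, decide_true, if_true, hne, bne_self_eq_false, Bool.false_eq_true,
          if_false, ne_eq, not_true_eq_false]
        ring
      · have hb : ((((A / d : Nat)) : Int) != (d : Int)) = true := by
          simp only [bne_iff_ne, ne_eq]
          exact_mod_cast hne
        simp only [hdvd, decide_true, if_true, hb, hne, ne_eq, not_false_eq_true]
        ring
    · simp only [hdvd, decide_false, Bool.false_eq_true, if_false]
      ring

theorem divisor_pairing (A : Nat) (hA : 0 < A) (g : Nat → Int) :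
    ∑ k ∈ (Finset.Ico 1 (Nat.sqrt A + 1)).filter (fun k => k ∣ A),
        (g k + if A / k ≠ k then g (A / k) else 0)
      = ∑ m ∈ A.divisors, g m := by
  have hA' : A ≠ 0 := hA.ne'
  have hS : (Finset.Ico 1 (Nat.sqrt A + 1)).filter (fun k => k ∣ A)
      = A.divisors.filter (fun k => k ≤ Nat.sqrt A) := by
    ext k
    simp only [Finset.mem_filter, Finset.mem_Ico, Nat.mem_divisors]
    constructor
    · rintro ⟨⟨h1, h2⟩, h3⟩; exact ⟨⟨h3, hA'⟩, by omega⟩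
    · rintro ⟨⟨h1, _⟩, h2⟩
      have : k ≠ 0 := by rintro rfl; exact hA' (Nat.zero_dvd.mp h1)
      exact ⟨⟨by omega, by omega⟩, h1⟩
  rw [hS]
  -- split divisors at sqrt
  rw [← Finset.sum_filter_add_sum_filter_not A.divisors (fun k => k ≤ Nat.sqrt A) g]
  -- small divisors with distinct cofactor ↔ large divisors
  have hL : ∑ k ∈ (A.divisors.filter (fun k => k ≤ Nat.sqrt A)).filter (fun k => A / k ≠ k),
        g (A / k)
      = ∑ m ∈ A.divisors.filter (fun k => ¬ k ≤ Nat.sqrt A), g m := by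
    apply Finset.sum_nbij' (fun k => A / k) (fun m => A / m)
    · intro k hk
      simp only [Finset.mem_filter, Nat.mem_divisors] at hk ⊢
      obtain ⟨⟨⟨hdvd, _⟩, hle⟩, hne⟩ := hk
      have hk0 : k ≠ 0 := by rintro rfl; exact hA' (Nat.zero_dvd.mp hdvd)
      refine ⟨⟨Nat.div_dvd_of_dvd hdvd, hA'⟩, ?_⟩
      intro hle2
      have hmul : k * (A / k) = A := Nat.mul_div_cancel' hdvd
      have hs2 : Nat.sqrt A * Nat.sqrt A ≤ A := by
        simpa [pow_two] using Nat.sqrt_le' A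
      have hsp : 0 < Nat.sqrt A := Nat.sqrt_pos.mpr hA
      rcases Nat.lt_or_ge k (Nat.sqrt A) with h | h
      · have t1 : A ≤ k * Nat.sqrt A := by
          calc A = k * (A / k) := hmul.symm
            _ ≤ k * Nat.sqrt A := Nat.mul_le_mul le_rfl hle2
        have t2 : k * Nat.sqrt A < Nat.sqrt A * Nat.sqrt A :=
          Nat.mul_lt_mul_of_lt_of_le h (le_refl _) hsp
        omega
      · have hk' : k = Nat.sqrt A := le_antisymm hle h
        have t1 : k * k ≤ k * (A / k) := by
          calc k * k = Nat.sqrt A * Nat.sqrt A := by rw [hk']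
            _ ≤ A := hs2
            _ = k * (A / k) := hmul.symm
        have t2 : k ≤ A / k := Nat.le_of_mul_le_mul_left t1 (by omega)
        rw [← hk'] at hle2
        exact hne (le_antisymm hle2 t2)
    · intro m hm
      simp only [Finset.mem_filter, Nat.mem_divisors] at hm ⊢
      obtain ⟨⟨hdvd, _⟩, hgt⟩ := hm
      have hm0 : m ≠ 0 := by rintro rfl; exact hA' (Nat.zero_dvd.mp hdvd)
      have hmul : m * (A / m) = A := Nat.mul_div_cancel' hdvd
      have hle : A / m ≤ Nat.sqrt A := by
        by_contra hgt2
        have hlt : A < (Nat.sqrt A + 1) * (Nat.sqrt A + 1) := by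
          simpa [pow_two, Nat.succ_eq_add_one] using Nat.lt_succ_sqrt' A
        have t : (Nat.sqrt A + 1) * (Nat.sqrt A + 1) ≤ m * (A / m) :=
          Nat.mul_le_mul (by omega) (by omega)
        omega
      refine ⟨⟨⟨Nat.div_dvd_of_dvd hdvd, hA'⟩, hle⟩, ?_⟩
      rw [Nat.div_div_self hdvd hA']
      intro hc; rw [hc] at hgt; exact hgt hle
    · intro k hk
      simp only [Finset.mem_filter, Nat.mem_divisors] at hk
      exact Nat.div_div_self hk.1.1.1 hA'
    · intro m hm
      simp only [Finset.mem_filter, Nat.mem_divisors] at hm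
      exact Nat.div_div_self hm.1.1 hA'
    · intro k hk; rfl
  rw [← hL, Finset.sum_filter (fun k => A / k ≠ k) (fun k => g (A / k)), ← Finset.sum_add_distrib]

theorem delta_sum (e x : Int) (he : e ≠ 0) :
    (if (PySem.Int.mod e x == 0) = true then (1 : Int) else 0)
      = ∑ m ∈ e.natAbs.divisors,
          ((if (x == (m : Int)) = true then (1 : Int) else 0)
            + (if (x == -(m : Int)) = true then (1 : Int) else 0)) := by
  have hA : e.natAbs ≠ 0 := Int.natAbs_ne_zero.mpr he
  by_cases hx : x ∣ e
  · have hx0 : x ≠ 0 := by rintro rfl; exact he (Int.zero_dvd.mp hx)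
    have hm0 : x.natAbs ∈ e.natAbs.divisors :=
      Nat.mem_divisors.mpr ⟨Int.natAbs_dvd_natAbs.mpr hx, hA⟩
    rw [if_pos (by simp [(PySem.Int.mod_eq_zero_iff_dvd e x).mpr hx])]
    rw [Finset.sum_eq_single x.natAbs]
    · rcases lt_or_gt_of_ne hx0 with hneg | hpos
      · have h1 : (x == (x.natAbs : Int)) = false := by
          simp only [beq_eq_false_iff_ne, ne_eq, Int.ofNat_natAbs_of_nonpos (le_of_lt hneg)]
          omega
        have h2 : (x == -(x.natAbs : Int)) = true := by
          simp only [beq_iff_eq, Int.ofNat_natAbs_of_nonpos (le_of_lt hneg), neg_neg]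
        simp only [h1, h2, if_true, Bool.false_eq_true, if_false]
        norm_num
      · have h1 : (x == (x.natAbs : Int)) = true := by
          simp only [beq_iff_eq, Int.natAbs_of_nonneg (le_of_lt hpos)]
        have h2 : (x == -(x.natAbs : Int)) = false := by
          simp only [beq_eq_false_iff_ne, ne_eq, Int.natAbs_of_nonneg (le_of_lt hpos)]
          omega
        simp only [h1, h2, if_true, Bool.false_eq_true, if_false]
        norm_num
    · intro m hm hne
      have h1 : (x == (m : Int)) = false := by
        simp only [beq_eq_false_iff_ne, ne_eq]
        intro hcc
        exact hne (by rw [hcc] at *; simp)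
      have h2 : (x == -(m : Int)) = false := by
        simp only [beq_eq_false_iff_ne, ne_eq]
        intro hcc
        exact hne (by rw [hcc] at *; simp)
      simp [h1, h2]
    · intro hnot; exact absurd hm0 hnot
  · have hmodf : (PySem.Int.mod e x == 0) = false := by
      rw [beq_eq_false_iff_ne]
      intro hc
      exact hx ((PySem.Int.mod_eq_zero_iff_dvd e x).mp hc)
    rw [hmodf]
    simp only [Bool.false_eq_true, if_false]
    symm
    apply Finset.sum_eq_zero
    intro m hm
    have hmd : ((m : Int)) ∣ e := by
      have h1 : (m : Int) ∣ (e.natAbs : Int) :=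
        Int.natCast_dvd_natCast.mpr (Nat.mem_divisors.mp hm).1
      exact dvd_trans h1 (Int.natAbs_dvd.mpr dvd_rfl)
    have h1 : (x == (m : Int)) = false := by
      rw [beq_eq_false_iff_ne]
      rintro rfl; exact hx hmd
    have h2 : (x == -(m : Int)) = false := by
      rw [beq_eq_false_iff_ne]
      rintro rfl; exact hx ((neg_dvd).mpr hmd)
    simp [h1, h2]

theorem countP_divisors (e : Int) (he : e ≠ 0) (lista : List Int) :
    (lista.countP (fun l => PySem.Int.mod e l == 0) : Int)
      = ∑ m ∈ e.natAbs.divisors,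
          ((lista.count ((m : Int)) : Int) + (lista.count (-(m : Int)) : Int)) := by
  induction lista with
  | nil => simp
  | cons x xs ih =>
    rw [List.countP_cons]
    push_cast
    rw [ih]
    simp only [List.count_cons]
    push_cast
    simp only [Finset.sum_add_distrib]
    have hδ := delta_sum e x he
    rw [Finset.sum_add_distrib] at hδ
    omega

theorem alt_eq_filter (lista : List Int) (h0 : (0 : Int) ∉ lista) :
    liczby_niezalezne_alt lista =
      lista.filter (fun e => lista.countP (fun l => PySem.Int.mod e l == 0) == 1) := by
  simp only [liczby_niezalezne_alt, PySem.Dict.foldl_insert_getD_add_one_eq_counter,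
    PySem.List.foldl_append_if_eq_filter, List.nil_append]
  apply List.filter_congr
  intro e he
  have he0 : e ≠ 0 := fun hc => h0 (hc ▸ he)
  have hA : 0 < e.natAbs := Int.natAbs_pos.mpr he0
  have ha : (if e ≥ 0 then e else -e) = ((e.natAbs : Nat) : Int) := by
    split_ifs with h
    · rw [Int.natAbs_of_nonneg h]
    · rw [Int.ofNat_natAbs_of_nonpos (by omega)]
  rw [ha]
  have hz : (((e.natAbs : Nat) : Int) == 0) = false := by
    simp only [beq_eq_false_iff_ne, ne_eq]
    exact_mod_cast hA.ne'
  rw [hz]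
  simp only [Bool.false_eq_true, if_false]
  rw [pvSqrtLoop_inv (PySem.Dict.counter lista) e.natAbs (Nat.sqrt e.natAbs) 1 0
    (le_refl 1) (by omega)]
  simp only [PySem.Dict.getD_counter]
  rw [divisor_pairing e.natAbs hA (fun m => (lista.count ((m : Int)) : Int) + (lista.count (-(m : Int)) : Int))]
  rw [← countP_divisors e he0 lista]
  simp [Nat.cast_eq_one]

-- ===== VERDICT (by name: the statement is the Claim_ definition above) =====
theorem liczby_niezalezne_spec : Claim_equal_liczby_niezalezne := by
  intro lista _ hpre
  unfold Spec_liczby_niezalezne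
  rw [liczby_niezalezne_eq_filter, alt_eq_filter lista hpre]
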